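-- pv_equiv track=rewrite | github.com/SchriderLab/geneConvSweeps | injectSlim.py | removeOrigSamplingBlock
-- ===== SOURCE A (Python) =====
-- def removeOrigSamplingBlock(raw_lines):
--     new_lines = []
--     skipMode = 0
--     skipCount = 0
--     for line in raw_lines:
--         if skipMode == 0 and "    // Sample individuals." in line:
--             skipMode = 1
--         if skipMode == 1:
--             skipCount += 1
--             if line == "    }":
--                 skipMode = 2
--         else:
--             new_lines.append(line)
--     return new_lines
-- ===== SOURCE B (Python) =====
-- def removeOrigSamplingBlock(raw_lines):
--     start = None
--     for i, line in enumerate(raw_lines):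
--         if "    // Sample individuals." in line:
--             start = i
--             break
--     if start is None:
--         return list(raw_lines)
--     for j in range(start, len(raw_lines)):
--         if raw_lines[j] == "    }":
--             return raw_lines[:start] + raw_lines[j + 1:]
--     return raw_lines[:start]
-- ===== Notes on version B (the rewrite author's own statement) =====
-- stated objective: simpler
-- what changed: Replaces the flag-driven single-pass append loop (skipMode state machine) by boundary detection plus slicing: find the first line containing the marker, find the first ' }' from there, and splice the two slices.
import Mathlib
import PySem

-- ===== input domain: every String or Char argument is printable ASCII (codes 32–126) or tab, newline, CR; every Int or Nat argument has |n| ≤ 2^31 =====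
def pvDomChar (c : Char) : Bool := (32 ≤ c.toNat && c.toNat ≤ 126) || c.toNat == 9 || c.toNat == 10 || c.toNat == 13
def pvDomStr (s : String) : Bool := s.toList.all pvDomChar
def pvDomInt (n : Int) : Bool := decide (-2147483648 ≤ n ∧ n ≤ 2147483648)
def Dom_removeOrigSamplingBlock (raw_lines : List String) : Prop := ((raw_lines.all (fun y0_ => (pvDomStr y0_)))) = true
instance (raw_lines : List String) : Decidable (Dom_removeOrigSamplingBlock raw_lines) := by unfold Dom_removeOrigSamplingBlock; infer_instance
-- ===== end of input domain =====

-- B replaces A's flag-driven append loop by boundary detection plus slicing (objective: simpler).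


-- shared string tests: '"    // Sample individuals." in line' and 'line == "    }"'
def pvIsStart (line : String) : Bool := PySem.Str.isIn "    // Sample individuals." line
def pvIsClose (line : String) : Bool := line == "    }"

-- ===== PORT A =====
-- A's loop body over the state (new_lines, skipMode, skipCount)
def removeOrigSamplingBlockBody (st : List String × Int × Int) (line : String) :
    List String × Int × Int :=
  let skipMode := if st.2.1 == 0 && pvIsStart line then 1 else st.2.1
  if skipMode == 1 then
    (st.1, if pvIsClose line then 2 else skipMode, st.2.2 + 1)
  else
    (st.1 ++ [line], skipMode, st.2.2)

def removeOrigSamplingBlock (raw_lines : List String) : List String :=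
  (raw_lines.foldl removeOrigSamplingBlockBody ([], 0, 0)).1

-- ===== PORT B =====
def removeOrigSamplingBlock_alt (raw_lines : List String) : List String :=
  match raw_lines.findIdx? pvIsStart with
  | none => raw_lines
  | some i =>
    match (raw_lines.drop i).findIdx? pvIsClose with
    | none => raw_lines.take i
    | some k => raw_lines.take i ++ raw_lines.drop (i + k + 1)

-- ===== PRECONDITION & SPEC =====
def Spec_removeOrigSamplingBlock (raw_lines : List String) (out : List String) : Prop := out = removeOrigSamplingBlock_alt raw_lines
instance (raw_lines : List String) (out : List String) : Decidable (Spec_removeOrigSamplingBlock raw_lines out) := by unfold Spec_removeOrigSamplingBlock; infer_instance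

-- ===== CLAIM (what is proved, stated in full; the proofs are below) =====
def Claim_equal_removeOrigSamplingBlock : Prop := ∀ (raw_lines : List String), Dom_removeOrigSamplingBlock raw_lines → Spec_removeOrigSamplingBlock raw_lines (removeOrigSamplingBlock raw_lines)

-- ===== LEMMAS AND PROOFS =====

-- In skip mode 2 the loop appends every remaining line.
theorem foldl_body_mode2 (l : List String) (acc : List String) (c : Int) :
    (l.foldl removeOrigSamplingBlockBody (acc, 2, c)).1 = acc ++ l := by
  induction l generalizing acc c with
  | nil => simp
  | cons x rest ih =>
      simp only [List.foldl_cons, removeOrigSamplingBlockBody]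
      norm_num
      rw [ih]; simp

-- In skip mode 1 the loop skips up to and including the first "    }", then appends the rest.
theorem foldl_body_mode1 (l : List String) (acc : List String) (c : Int) :
    (l.foldl removeOrigSamplingBlockBody (acc, 1, c)).1 =
      match l.findIdx? pvIsClose with
      | none => acc
      | some k => acc ++ l.drop (k + 1) := by
  induction l generalizing acc c with
  | nil => simp
  | cons x rest ih =>
      simp only [List.foldl_cons, removeOrigSamplingBlockBody]
      norm_num
      by_cases hx : pvIsClose x = true
      · simp [hx, foldl_body_mode2, List.findIdx?_cons]
      · simp only [hx, if_false, List.findIdx?_cons, Bool.false_eq_true]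
        rw [ih]
        cases h : rest.findIdx? pvIsClose <;> simp [h]

-- In skip mode 0 the loop computes exactly B's splice.
theorem foldl_body_mode0 (l : List String) (acc : List String) (c : Int) :
    (l.foldl removeOrigSamplingBlockBody (acc, 0, c)).1 =
      match l.findIdx? pvIsStart with
      | none => acc ++ l
      | some i =>
        match (l.drop i).findIdx? pvIsClose with
        | none => acc ++ l.take i
        | some k => acc ++ (l.take i ++ l.drop (i + k + 1)) := by
  induction l generalizing acc c with
  | nil => simp
  | cons x rest ih =>
      by_cases hs : pvIsStart x = true
      · simp only [List.foldl_cons, removeOrigSamplingBlockBody, hs]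
        norm_num
        by_cases hx : pvIsClose x = true
        · simp [hx, hs, foldl_body_mode2, List.findIdx?_cons]
        · simp only [hx, if_false, Bool.false_eq_true]
          rw [foldl_body_mode1]
          simp only [List.findIdx?_cons, hs, if_pos, List.drop_zero, List.take_zero, hx,
            Bool.false_eq_true, if_false]
          cases h : rest.findIdx? pvIsClose <;> simp [h]
      · simp only [List.foldl_cons, removeOrigSamplingBlockBody, hs]
        norm_num
        rw [ih]
        simp only [List.findIdx?_cons, hs, Bool.false_eq_true, if_false]
        cases h : rest.findIdx? pvIsStart with
        | none => simp
        | some i =>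
            simp only [Option.map_some, List.drop_succ_cons, List.take_succ_cons]
            cases h2 : (rest.drop i).findIdx? pvIsClose <;> simp [Nat.add_right_comm]

-- ===== VERDICT (by name: the statement is the Claim_ definition above) =====
theorem removeOrigSamplingBlock_spec : Claim_equal_removeOrigSamplingBlock := by
  intro raw_lines _
  unfold Spec_removeOrigSamplingBlock removeOrigSamplingBlock removeOrigSamplingBlock_alt
  rw [foldl_body_mode0]
  cases h : raw_lines.findIdx? pvIsStart with
  | none => simp
  | some i => cases h2 : (raw_lines.drop i).findIdx? pvIsClose <;> simp
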